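-- pv_equiv track=rewrite | github.com/samjrholt/autolab | src/autolab/query.py | _find_op
-- ===== SOURCE A (Python) =====
-- def _find_op(clause: str, op: str) -> int | None:
--     # Skip inside quotes.
--     idx = 0
--     in_quote: str | None = None
--     while idx < len(clause):
--         ch = clause[idx]
--         if in_quote:
--             if ch == in_quote:
--                 in_quote = None
--             idx += 1
--             continue
--         if ch in "\"'":
--             in_quote = ch
--             idx += 1
--             continue
--         if clause.startswith(op, idx):
--             return idx
--         idx += 1
--     return None
-- ===== SOURCE B (Python) =====
-- def _find_op(clause: str, op: str) -> int | None:
--     # Pass 1: mark which indices are eligible for the operator test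
--     # (not inside a quote and not a quote delimiter that opens a string).
--     eligible = []
--     q = None
--     for ch in clause:
--         if q is not None:
--             eligible.append(False)
--             if ch == q:
--                 q = None
--         elif ch in "\"'":
--             eligible.append(False)
--             q = ch
--         else:
--             eligible.append(True)
--     # Pass 2: first eligible index where op starts (on the ORIGINAL clause).
--     for i, e in enumerate(eligible):
--         if e and clause.startswith(op, i):
--             return i
--     return None
-- ===== Notes on version B (the rewrite author's own statement) =====
-- stated objective: alternative
-- what changed: Replaced the single quote-tracking while-loop that tests startswith inline with a two-pass decomposition: first a scan building an eligibility mask from the quote state, then a separate search for the first eligible index where op starts.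
import Mathlib
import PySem

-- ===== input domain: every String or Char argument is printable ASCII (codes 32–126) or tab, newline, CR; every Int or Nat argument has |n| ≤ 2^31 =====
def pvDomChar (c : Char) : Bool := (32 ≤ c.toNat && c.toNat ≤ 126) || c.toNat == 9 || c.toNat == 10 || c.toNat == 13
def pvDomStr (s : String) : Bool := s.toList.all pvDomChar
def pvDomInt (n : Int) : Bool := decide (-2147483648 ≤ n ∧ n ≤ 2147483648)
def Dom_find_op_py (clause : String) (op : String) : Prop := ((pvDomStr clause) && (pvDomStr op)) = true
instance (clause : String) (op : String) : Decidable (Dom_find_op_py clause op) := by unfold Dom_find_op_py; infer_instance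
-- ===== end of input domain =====

-- B changes the decomposition (two passes: an eligibility mask, then the search) instead of A's single quote-tracking loop; same cost, objective: alternative.

-- ===== PORT A =====
-- A's while-loop: recursion over the remaining suffix (= clause[idx:]), carrying idx and in_quote.
def findOpA (op : List Char) : List Char → Nat → Option Char → Option Int
  | [], _, _ => none
  | ch :: rest, idx, some q =>
      -- in_quote branch: close on matching quote, always advance
      if ch == q then findOpA op rest (idx + 1) none
      else findOpA op rest (idx + 1) (some q)
  | ch :: rest, idx, none =>
      if ch == '"' || ch == '\'' then findOpA op rest (idx + 1) (some ch)
      else if PySem.Chars.startswith (ch :: rest) op then some (idx : Int)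
      else findOpA op rest (idx + 1) none

def find_op_py (clause : String) (op : String) : Option Int :=
  findOpA op.toList clause.toList 0 none

-- ===== PORT B =====
-- Pass 1: the eligibility mask (Source B's first loop over the characters, carrying q).
def eligB : Option Char → List Char → List Bool
  | _, [] => []
  | some q, ch :: rest => false :: eligB (if ch == q then none else some q) rest
  | none, ch :: rest =>
      if ch == '"' || ch == '\'' then false :: eligB (some ch) rest
      else true :: eligB none rest

-- Pass 2: first index i with eligible[i] and clause.startswith(op, i) (Source B's enumerate loop).
def scanB (op cs : List Char) : List Bool → Nat → Option Int
  | [], _ => none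
  | e :: es, i =>
      if e && PySem.Chars.startswith (cs.drop i) op then some (i : Int)
      else scanB op cs es (i + 1)

def find_op_py_alt (clause : String) (op : String) : Option Int :=
  scanB op.toList clause.toList (eligB none clause.toList) 0

-- ===== PRECONDITION & SPEC =====
def Spec_find_op_py (clause : String) (op : String) (out : Option Int) : Prop := out = find_op_py_alt clause op
instance (clause : String) (op : String) (out : Option Int) : Decidable (Spec_find_op_py clause op out) := by unfold Spec_find_op_py; infer_instance

-- ===== CLAIM (what is proved, stated in full; the proofs are below) =====
def Claim_equal_find_op_py : Prop := ∀ (clause : String) (op : String), Dom_find_op_py clause op → Spec_find_op_py clause op (find_op_py clause op)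

-- ===== LEMMAS AND PROOFS =====

theorem findOpA_eq_scanB (op cs : List Char) :
    ∀ (rest : List Char) (i : Nat) (q : Option Char), cs.drop i = rest →
      findOpA op rest i q = scanB op cs (eligB q rest) i := by
  intro rest
  induction rest with
  | nil => intro i q h; simp [findOpA, eligB, scanB]
  | cons ch tail ih =>
    intro i q h
    have htail : cs.drop (i + 1) = tail := by
      have := congrArg List.tail h
      rwa [List.tail_drop] at this
    cases q with
    | some qc =>
      by_cases hq : ch = qc <;>
        simp [findOpA, eligB, scanB, hq, ih _ _ htail]
    | none =>
      by_cases hq : ch = '"' ∨ ch = '\''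
      · rcases hq with hq | hq <;>
          simp [findOpA, eligB, scanB, hq, ih _ _ htail]
      · push Not at hq
        simp [findOpA, eligB, scanB, hq.1, hq.2, h, ih _ _ htail]

-- ===== VERDICT (by name: the statement is the Claim_ definition above) =====
theorem find_op_py_spec : Claim_equal_find_op_py := by
  intro clause op _
  unfold Spec_find_op_py find_op_py find_op_py_alt
  exact findOpA_eq_scanB op.toList clause.toList clause.toList 0 none (by simp)
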